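-- pv_equiv track=rewrite | github.com/142857why/Leetcode-python | 2022-spring-problem2.py | perfectMenu
-- ===== SOURCE A (Python) =====
-- from typing import List
--
-- def perfectMenu(materials: List[int], cookbooks: List[List[int]], attribute: List[List[int]],
--                 limit: int) -> int:
--     max_delicious_value = -1
--     n = len(cookbooks)
--     nums = [x for x in range(n)]
--
--     def subsets(nums):
--         res = [[]]
--         for num in nums:
--             res += [i + [num] for i in res]
--         return res
--
--     all_possibilities = subsets(nums)
--     for p in all_possibilities:
--         m = materials.copy()
--         current_delicious = 0
--         current_energy = 0
--         flag = True
--         for index in p: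
--             for i, usage in enumerate(cookbooks[index]):
--                 m[i] -= usage
--                 if m[i] < 0:
--                     flag = False
--                     break
--             current_energy += attribute[index][1]
--             current_delicious += attribute[index][0]
--
--         if flag:
--             if current_energy >= limit:
--                 max_delicious_value = max(max_delicious_value, current_delicious)
--
--     return max_delicious_value
-- ===== SOURCE B (Python) =====
-- def perfectMenu(materials, cookbooks, attribute, limit):
--     n = len(cookbooks)
--     best = -1
--
--     def dfs(k, m, d, e):
--         nonlocal best
--         if k == n:
--             if e >= limit:
--                 best = max(best, d)
--             return
--         dfs(k + 1, m, d, e)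
--         row = cookbooks[k]
--         head = [a - b for a, b in zip(m, row)]
--         if all(x >= 0 for x in head):
--             dfs(k + 1, head + m[len(row):], d + attribute[k][0], e + attribute[k][1])
--
--     dfs(0, materials, 0, 0)
--     return best
-- ===== Notes on version B (the rewrite author's own statement) =====
-- stated objective: faster
-- what changed: A materialises all 2^n index subsets with the `subsets` helper and re-processes each one from scratch; B does an include/exclude DFS over cookbook indices that shares the work of common prefixes and prunes a branch as soon as including a cookbook drives some material negative.
-- outside the precondition, e.g. on perfectMenu([1], [[0, 0]], [[7, 9]], 0): A raises IndexError, B returns 7; on perfectMenu([1], [[2, 0]], [[7, 9]], 0): A returns 0, B returns 0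
import Mathlib
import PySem

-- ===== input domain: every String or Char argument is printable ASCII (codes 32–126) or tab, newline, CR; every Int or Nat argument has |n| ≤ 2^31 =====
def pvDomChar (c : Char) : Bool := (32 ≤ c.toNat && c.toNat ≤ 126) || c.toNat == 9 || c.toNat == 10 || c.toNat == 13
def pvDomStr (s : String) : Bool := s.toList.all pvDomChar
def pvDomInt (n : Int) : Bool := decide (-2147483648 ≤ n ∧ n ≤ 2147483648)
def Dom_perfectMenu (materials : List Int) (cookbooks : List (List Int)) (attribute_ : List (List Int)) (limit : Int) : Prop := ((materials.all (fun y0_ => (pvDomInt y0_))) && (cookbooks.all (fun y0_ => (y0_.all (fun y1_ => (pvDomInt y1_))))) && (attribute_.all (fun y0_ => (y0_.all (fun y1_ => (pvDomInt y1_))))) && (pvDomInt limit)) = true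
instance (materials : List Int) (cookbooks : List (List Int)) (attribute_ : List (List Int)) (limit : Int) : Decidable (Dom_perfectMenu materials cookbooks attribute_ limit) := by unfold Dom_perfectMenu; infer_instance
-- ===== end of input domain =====

-- B replaces A's materialisation of all 2^n subsets (each re-processed from scratch) by an
-- include/exclude DFS over cookbook indices that shares prefix work and prunes a branch as soon
-- as a material goes negative.

-- ===== PORT A =====
-- the inner `for i, usage in enumerate(cookbooks[index])` loop with its `break`:
-- m[i] -= usage; if m[i] < 0: flag=False; break   (index always in range under Pre_)
def pvRowStep : List Int → Nat → List Int → List Int × Bool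
  | m, _, [] => (m, true)
  | m, i, usage :: rest =>
      let m' := m.set i (m.getD i 0 - usage)
      if m'.getD i 0 < 0 then (m', false) else pvRowStep m' (i + 1) rest

-- the nested python helper `subsets`
def pvSubsets (nums : List Nat) : List (List Nat) :=
  nums.foldl (fun res num => res ++ res.map (fun i => i ++ [num])) [[]]

-- one iteration of `for index in p:` — state is (m, current_delicious, current_energy, flag)
def pvStep (cookbooks attribute_ : List (List Int))
    (st : List Int × Int × Int × Bool) (index : Nat) : List Int × Int × Int × Bool :=
  let res := pvRowStep st.1 0 (cookbooks.getD index [])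
  (res.1, st.2.1 + (attribute_.getD index []).getD 0 0,
          st.2.2.1 + (attribute_.getD index []).getD 1 0,
          st.2.2.2 && res.2)

def perfectMenu (materials : List Int) (cookbooks : List (List Int)) (attribute_ : List (List Int)) (limit : Int) : Int :=
  (pvSubsets (List.range cookbooks.length)).foldl
    (fun best p =>
      let r := p.foldl (pvStep cookbooks attribute_) (materials, (0 : Int), (0 : Int), true)
      if r.2.2.2 && decide (limit ≤ r.2.2.1) then max best r.2.1 else best)
    (-1)

-- ===== PORT B =====
-- DFS over indices k = n-fuel, …, n-1; exclude branch first, then (if no material goes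
-- negative) the include branch; `best` is the accumulator threaded through the leaves.
def altDFS (cookbooks attribute_ : List (List Int)) (limit : Int) :
    Nat → Nat → List Int → Int → Int → Int → Int
  | 0, _, _, d, e, best => if limit ≤ e then max best d else best
  | fuel + 1, k, m, d, e, best =>
      let best1 := altDFS cookbooks attribute_ limit fuel (k + 1) m d e best
      let row := cookbooks.getD k []
      let head := (m.zip row).map (fun ab => ab.1 - ab.2)
      if head.all (fun x => decide (0 ≤ x)) then
        altDFS cookbooks attribute_ limit fuel (k + 1) (head ++ m.drop row.length)
          (d + (attribute_.getD k []).getD 0 0) (e + (attribute_.getD k []).getD 1 0) best1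
      else best1

def perfectMenu_alt (materials : List Int) (cookbooks : List (List Int)) (attribute_ : List (List Int)) (limit : Int) : Int :=
  altDFS cookbooks attribute_ limit cookbooks.length 0 materials 0 0 (-1)

-- ===== PRECONDITION & SPEC =====
-- Pre_ excludes the inputs on which Python A raises IndexError: a cookbook row longer than
-- materials (m[i] out of range), or attribute missing a row / a row shorter than 2 entries.
-- (Slightly conservative: if a row is longer than materials A may still return when the inner
-- loop breaks on a negative material before reaching the bad index; see claim.json cites.)
def Pre_perfectMenu (materials : List Int) (cookbooks : List (List Int)) (attribute_ : List (List Int)) (limit : Int) : Prop :=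
  (∀ row ∈ cookbooks, row.length ≤ materials.length) ∧
  cookbooks.length ≤ attribute_.length ∧
  (∀ row ∈ attribute_.take cookbooks.length, 2 ≤ row.length)
instance (materials : List Int) (cookbooks : List (List Int)) (attribute_ : List (List Int)) (limit : Int) : Decidable (Pre_perfectMenu materials cookbooks attribute_ limit) := by unfold Pre_perfectMenu; infer_instance

def pvWitness_perfectMenu : List Int × List (List Int) × List (List Int) × Int :=
  ([5, 5], [[1, 0], [2, 1]], [[3, 10], [4, 2]], 5)

def Spec_perfectMenu (materials : List Int) (cookbooks : List (List Int)) (attribute_ : List (List Int)) (limit : Int) (out : Int) : Prop := out = perfectMenu_alt materials cookbooks attribute_ limit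
instance (materials : List Int) (cookbooks : List (List Int)) (attribute_ : List (List Int)) (limit : Int) (out : Int) : Decidable (Spec_perfectMenu materials cookbooks attribute_ limit out) := by unfold Spec_perfectMenu; infer_instance

-- ===== CLAIM (what is proved, stated in full; the proofs are below) =====
def Claim_equal_perfectMenu : Prop := ∀ (materials : List Int) (cookbooks : List (List Int)) (attribute_ : List (List Int)) (limit : Int), Dom_perfectMenu materials cookbooks attribute_ limit → Pre_perfectMenu materials cookbooks attribute_ limit → Spec_perfectMenu materials cookbooks attribute_ limit (perfectMenu materials cookbooks attribute_ limit)

-- ===== LEMMAS AND PROOFS =====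

-- the value contributed by one subset p, processed from state (m, d, e, flag := true)
def pvEval (cookbooks attribute_ : List (List Int)) (limit : Int)
    (m : List Int) (d e : Int) (p : List Nat) (b : Int) : Int :=
  if (p.foldl (pvStep cookbooks attribute_) (m, d, e, true)).2.2.2 &&
      decide (limit ≤ (p.foldl (pvStep cookbooks attribute_) (m, d, e, true)).2.2.1) then
    max b (p.foldl (pvStep cookbooks attribute_) (m, d, e, true)).2.1
  else b

-- the subsets of {k, …, k+fuel-1} in DFS leaf order (exclude-k block first)
def pvSdfs : Nat → Nat → List (List Nat)
  | 0, _ => [[]]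
  | fuel + 1, k => pvSdfs fuel (k + 1) ++ (pvSdfs fuel (k + 1)).map (fun p => k :: p)

def pvHead (m row : List Int) : List Int := (m.zip row).map (fun ab => ab.1 - ab.2)

lemma rowStep_flag (row : List Int) : ∀ (m : List Int) (i : Nat),
    (pvRowStep m i row).2 = (pvHead (m.drop i) row).all (fun x => decide (0 ≤ x)) := by
  induction row with
  | nil => intro m i; simp [pvRowStep, pvHead]
  | cons u rest ih =>
    intro m i
    by_cases h : i < m.length
    · have hd : m.drop i = m[i] :: m.drop (i + 1) := List.drop_eq_getElem_cons h
      rw [pvRowStep]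
      simp only [List.getD_eq_getElem?_getD, List.getElem?_set_self (by simpa using h),
        List.getElem?_eq_getElem h, Option.getD_some]
      by_cases hneg : m[i] - u < 0
      · rw [if_pos hneg]
        simp only [pvHead, hd, List.zip_cons_cons, List.map_cons, List.all_cons]
        have hn : ¬ (0 : Int) ≤ m[i] - u := by omega
        simp only [decide_eq_false hn, Bool.false_and]
      · have h0 : (0 : Int) ≤ m[i] - u := Int.not_lt.mp hneg
        rw [if_neg hneg, ih]
        have hdrop : (m.set i (m[i] - u)).drop (i + 1) = m.drop (i + 1) := by
          rw [List.drop_set]; simp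
        simp only [pvHead, hd, hdrop, List.zip_cons_cons, List.map_cons, List.all_cons]
        simp only [decide_eq_true h0, Bool.true_and]
    · have hge : m.length ≤ i := Nat.le_of_not_lt h
      have hset : m.set i (m.getD i 0 - u) = m := List.set_eq_of_length_le hge
      have hnil : m.drop i = [] := List.drop_eq_nil_of_le hge
      have hnil' : m.drop (i + 1) = [] := List.drop_eq_nil_of_le (Nat.le_succ_of_le hge)
      have hz : m[i]? = none := List.getElem?_eq_none hge
      rw [pvRowStep]
      rw [hset]
      simp only [List.getD_eq_getElem?_getD, hz, Option.getD_none]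
      rw [if_neg (lt_irrefl (0 : Int)), ih]
      simp [pvHead, hnil, hnil']

lemma rowStep_m (row : List Int) : ∀ (m : List Int) (i : Nat),
    (pvRowStep m i row).2 = true →
    (pvRowStep m i row).1 = m.take i ++ pvHead (m.drop i) row ++ m.drop (i + row.length) := by
  induction row with
  | nil => intro m i _; simp [pvRowStep, pvHead]
  | cons u rest ih =>
    intro m i hfl
    by_cases h : i < m.length
    · have hd : m.drop i = m[i] :: m.drop (i + 1) := List.drop_eq_getElem_cons h
      rw [pvRowStep] at hfl ⊢
      simp only [List.getD_eq_getElem?_getD, List.getElem?_set_self (by simpa using h),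
        List.getElem?_eq_getElem h, Option.getD_some] at hfl ⊢
      by_cases hneg : m[i] - u < 0
      · rw [if_pos hneg] at hfl; simp at hfl
      · rw [if_neg hneg] at hfl ⊢
        rw [ih _ _ hfl]
        have hdrop : (m.set i (m[i] - u)).drop (i + 1) = m.drop (i + 1) := by
          rw [List.drop_set]; simp
        have htake : (m.set i (m[i] - u)).take (i + 1) = m.take i ++ [m[i] - u] := by
          rw [List.take_set, List.take_add_one, List.getElem?_eq_getElem h]
          have hlen : (m.take i).length = i := by simp [Nat.min_eq_left (Nat.le_of_lt h)]
          rw [List.set_append_right _ _ (by omega)]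
          simp [hlen]
        rw [hdrop, htake]
        have hdrop2 : (m.set i (m[i] - u)).drop (i + 1 + rest.length) = m.drop (i + 1 + rest.length) := by
          rw [List.drop_set, if_pos (by omega)]
        simp only [pvHead, hd, List.zip_cons_cons, List.map_cons]
        have harith : i + 1 + rest.length = i + (rest.length + 1) := by omega
        rw [harith] at hdrop2
        simp [harith, hdrop2]
    · have hge : m.length ≤ i := Nat.le_of_not_lt h
      have hset : m.set i (m.getD i 0 - u) = m := List.set_eq_of_length_le hge
      have hnil : m.drop i = [] := List.drop_eq_nil_of_le hge
      have hnil' : m.drop (i + 1) = [] := List.drop_eq_nil_of_le (Nat.le_succ_of_le hge)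
      have hz : m[i]? = none := List.getElem?_eq_none hge
      rw [pvRowStep] at hfl ⊢
      rw [hset] at hfl ⊢
      simp only [List.getD_eq_getElem?_getD, hz, Option.getD_none] at hfl ⊢
      rw [if_neg (lt_irrefl (0 : Int))] at hfl ⊢
      rw [ih _ _ hfl]
      have hnil'' : m.drop (i + (rest.length + 1)) = [] := List.drop_eq_nil_of_le (by omega)
      simp only [pvHead, hnil, hnil', List.zip_nil_left, List.map_nil,
        List.take_of_length_le hge, List.take_of_length_le (Nat.le_succ_of_le hge)]
      simp [List.drop_eq_nil_of_le (show m.length ≤ i + 1 + rest.length by omega),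
        List.drop_eq_nil_of_le (show m.length ≤ i + (rest.length + 1) by omega)]

-- flag latches: once False it stays False
lemma flag_latch (cookbooks attribute_ : List (List Int)) :
    ∀ (p : List Nat) (st : List Int × Int × Int × Bool), st.2.2.2 = false →
      ((p.foldl (pvStep cookbooks attribute_) st).2.2.2) = false := by
  intro p
  induction p with
  | nil => intro st h; simpa using h
  | cons k rest ih =>
    intro st h
    simp only [List.foldl_cons]
    exact ih _ (by simp [pvStep, h])

lemma eval_cons_fail (cookbooks attribute_ : List (List Int)) (limit : Int)
    (m : List Int) (d e : Int) (k : Nat) (p : List Nat) (b : Int)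
    (h : (pvHead m (cookbooks.getD k [])).all (fun x => decide (0 ≤ x)) = false) :
    pvEval cookbooks attribute_ limit m d e (k :: p) b = b := by
  have hrf : (pvRowStep m 0 (cookbooks.getD k [])).2 = false := by
    rw [rowStep_flag]; simpa using h
  have hfl : (pvStep cookbooks attribute_ (m, d, e, true) k).2.2.2 = false := by
    simp only [pvStep, Bool.true_and]; exact hrf
  unfold pvEval
  simp only [List.foldl_cons]
  rw [flag_latch _ _ _ _ hfl]
  simp

lemma eval_cons_ok (cookbooks attribute_ : List (List Int)) (limit : Int)
    (m : List Int) (d e : Int) (k : Nat) (p : List Nat) (b : Int)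
    (h : (pvHead m (cookbooks.getD k [])).all (fun x => decide (0 ≤ x)) = true) :
    pvEval cookbooks attribute_ limit m d e (k :: p) b =
      pvEval cookbooks attribute_ limit
        (pvHead m (cookbooks.getD k []) ++ m.drop (cookbooks.getD k []).length)
        (d + (attribute_.getD k []).getD 0 0) (e + (attribute_.getD k []).getD 1 0) p b := by
  have hfl : (pvRowStep m 0 (cookbooks.getD k [])).2 = true := by
    rw [rowStep_flag]; simpa using h
  have hm := rowStep_m (cookbooks.getD k []) m 0 hfl
  simp only [List.take_zero, List.drop_zero, List.nil_append, Nat.zero_add] at hm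
  have hst : pvStep cookbooks attribute_ (m, d, e, true) k =
      (pvHead m (cookbooks.getD k []) ++ m.drop (cookbooks.getD k []).length,
       d + (attribute_.getD k []).getD 0 0, e + (attribute_.getD k []).getD 1 0, true) := by
    simp only [pvStep, Bool.true_and]
    rw [hm, hfl]
  unfold pvEval
  simp only [List.foldl_cons, hst]

lemma foldl_id {α β : Type} (l : List α) (b : β) : l.foldl (fun b _ => b) b = b := by
  induction l <;> simp_all

lemma dfs_fold (cookbooks attribute_ : List (List Int)) (limit : Int) :
    ∀ (fuel k : Nat) (m : List Int) (d e best : Int),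
      altDFS cookbooks attribute_ limit fuel k m d e best =
        (pvSdfs fuel k).foldl (fun b p => pvEval cookbooks attribute_ limit m d e p b) best := by
  intro fuel
  induction fuel with
  | zero =>
    intro k m d e best
    simp only [altDFS, pvSdfs, List.foldl_cons, List.foldl_nil, pvEval, List.foldl_nil]
    by_cases h : limit ≤ e <;> simp [h]
  | succ fuel ih =>
    intro k m d e best
    rw [pvSdfs, List.foldl_append, List.foldl_map, ← ih]
    show altDFS cookbooks attribute_ limit (fuel + 1) k m d e best = _
    rw [altDFS]
    by_cases h : (pvHead m (cookbooks.getD k [])).all (fun x => decide (0 ≤ x)) = true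
    · simp only [pvHead] at h
      simp only [h, if_true]
      rw [ih]
      have : (fun (b : Int) (p : List Nat) => pvEval cookbooks attribute_ limit m d e (k :: p) b)
          = fun b p => pvEval cookbooks attribute_ limit
              (pvHead m (cookbooks.getD k []) ++ m.drop (cookbooks.getD k []).length)
              (d + (attribute_.getD k []).getD 0 0) (e + (attribute_.getD k []).getD 1 0) p b := by
        funext b p
        exact eval_cons_ok cookbooks attribute_ limit m d e k p b (by simpa [pvHead] using h)
      rw [this]
      simp [pvHead]
    · have h' : (pvHead m (cookbooks.getD k [])).all (fun x => decide (0 ≤ x)) = false :=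
        Bool.eq_false_iff.mpr h
      simp only [pvHead] at h'
      simp only [h', Bool.false_eq_true, if_false]
      have : (fun (b : Int) (p : List Nat) => pvEval cookbooks attribute_ limit m d e (k :: p) b)
          = fun b _ => b := by
        funext b p
        exact eval_cons_fail cookbooks attribute_ limit m d e k p b (by simpa [pvHead] using h')
      rw [this, foldl_id]

-- the accumulator function of python `subsets`
def pvF : List (List Nat) → Nat → List (List Nat) :=
  fun res num => res ++ res.map (fun i => i ++ [num])

lemma foldl_pvF_perm : ∀ (L : List Nat) {a b : List (List Nat)}, a.Perm b →
    (L.foldl pvF a).Perm (L.foldl pvF b) := by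
  intro L
  induction L with
  | nil => intro a b h; simpa using h
  | cons num L ih =>
    intro a b h
    simp only [List.foldl_cons]
    exact ih (h.append (h.map _))

lemma foldl_pvF_split : ∀ (L : List Nat) (a b : List (List Nat)),
    (L.foldl pvF (a ++ b)).Perm (L.foldl pvF a ++ L.foldl pvF b) := by
  intro L
  induction L with
  | nil => intro a b; simp
  | cons num L ih =>
    intro a b
    simp only [List.foldl_cons]
    have hperm : (pvF (a ++ b) num).Perm (pvF a num ++ pvF b num) := by
      simp only [pvF, List.map_append]
      have := List.Perm.append_left a
        (List.perm_append_comm_assoc b (a.map (· ++ [num])) (b.map (· ++ [num])))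
      simpa [List.append_assoc] using this
    exact (foldl_pvF_perm L hperm).trans (ih _ _)

lemma foldl_pvF_map_prefix : ∀ (L : List Nat) (res : List (List Nat)) (x : Nat),
    L.foldl pvF (res.map (fun p => x :: p)) = (L.foldl pvF res).map (fun p => x :: p) := by
  intro L
  induction L with
  | nil => intro res x; simp
  | cons num L ih =>
    intro res x
    simp only [List.foldl_cons]
    rw [← ih]
    congr 1
    simp [pvF, List.map_map, Function.comp_def]

lemma subsets_perm : ∀ (fuel k : Nat), (pvSubsets (List.range' k fuel)).Perm (pvSdfs fuel k) := by
  intro fuel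
  induction fuel with
  | zero => intro k; simp [pvSubsets, pvSdfs]
  | succ fuel ih =>
    intro k
    rw [List.range'_succ]
    show (List.foldl pvF [[]] (k :: List.range' (k + 1) fuel)).Perm _
    simp only [List.foldl_cons]
    have h1 : pvF [[]] k = [[]] ++ [[k]] := by simp [pvF]
    rw [h1]
    refine (foldl_pvF_split _ _ _).trans ?_
    have h2 : ([[k]] : List (List Nat)) = [[]].map (fun p => k :: p) := by simp
    rw [h2, foldl_pvF_map_prefix]
    rw [pvSdfs]
    exact (ih (k + 1)).append ((ih (k + 1)).map _)

lemma pvEval_comm (cookbooks attribute_ : List (List Int)) (limit : Int)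
    (m : List Int) (d e : Int) (x y : List Nat) (b : Int) :
    pvEval cookbooks attribute_ limit m d e y (pvEval cookbooks attribute_ limit m d e x b) =
    pvEval cookbooks attribute_ limit m d e x (pvEval cookbooks attribute_ limit m d e y b) := by
  unfold pvEval
  generalize List.foldl (pvStep cookbooks attribute_) (m, d, e, true) x = rx
  generalize List.foldl (pvStep cookbooks attribute_) (m, d, e, true) y = ry
  split_ifs <;> simp [max_right_comm]

-- ===== VERDICT (by name: the statement is the Claim_ definition above) =====
theorem perfectMenu_spec : Claim_equal_perfectMenu := by
  intro materials cookbooks attribute_ limit _ _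
  show perfectMenu materials cookbooks attribute_ limit = perfectMenu_alt materials cookbooks attribute_ limit
  have hA : perfectMenu materials cookbooks attribute_ limit =
      (pvSubsets (List.range cookbooks.length)).foldl
        (fun b p => pvEval cookbooks attribute_ limit materials 0 0 p b) (-1) := rfl
  rw [hA, List.range_eq_range']
  rw [(subsets_perm cookbooks.length 0).foldl_eq'
    (fun x _ y _ z => pvEval_comm cookbooks attribute_ limit materials 0 0 x y z) (-1)]
  rw [← dfs_fold]
  rfl
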